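-- pv_equiv track=rewrite | github.com/Iruze/SolutionsOnLeetcodeForZZW | 321_CreateMaximumNumber/maxNumber.py | maxNumber
-- ===== SOURCE A (Python) =====
-- def maxNumber(nums1, nums2, k):
--     # 求nums中长度为k的最大的序列
--     def maxKSeq(nums, k):
--         giveup = len(nums) - k
--         stack = []
--         for i, v in enumerate(nums):
--             while stack and stack[-1] < v and giveup:
--                 stack.pop()
--                 giveup -= 1
--             stack.append(v)
--         return stack[:k]
--     # 合并nums1和nums2序列
--     def merge(nums1, nums2):
--         nums = []
--         while nums1 and nums2:
--             nums.append(max(nums1, nums2).pop(0))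
--         return nums + (nums1 or nums2)
--
--     l1, l2 = len(nums1), len(nums2)
--     ans = [0 for _ in range(k)]
--     for s in range(max(0, k - l2), min(l1, k) + 1):
--         cur = merge(maxKSeq(nums1, s), maxKSeq(nums2, k - s))
--         # max可以从多个list中取字典序最大的那一个
--         ans = max(ans, cur)
--     return ans
-- ===== SOURCE B (Python) =====
-- def maxNumber(nums1, nums2, k):
--     # pick the max length-k subsequence by repeated windowed max scans
--     def pick(nums, k):
--         if k == 0:
--             return []
--         window = nums[:len(nums) - k + 1]
--         m = max(window)
--         j = window.index(m)
--         return [m] + pick(nums[j + 1:], k - 1)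
--
--     # index-based merge: take from whichever remaining suffix is lex-greater
--     def merge(a, b):
--         out = []
--         i = j = 0
--         while i < len(a) and j < len(b):
--             if a[i:] >= b[j:]:
--                 out.append(a[i])
--                 i += 1
--             else:
--                 out.append(b[j])
--                 j += 1
--         return out + a[i:] + b[j:]
--
--     l1, l2 = len(nums1), len(nums2)
--     ans = [0 for _ in range(k)]
--     for s in range(max(0, k - l2), min(l1, k) + 1):
--         cur = merge(pick(nums1, s), pick(nums2, k - s))
--         ans = max(ans, cur)
--     return ans
-- ===== Notes on version B (the rewrite author's own statement) =====
-- stated objective: alternative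
-- what changed: The monotonic-stack extraction of the best length-k subsequence is replaced by repeated windowed leftmost-max scans, and the mutating pop(0)-based merge by an index-based merge over suffix comparisons.
import Mathlib
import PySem

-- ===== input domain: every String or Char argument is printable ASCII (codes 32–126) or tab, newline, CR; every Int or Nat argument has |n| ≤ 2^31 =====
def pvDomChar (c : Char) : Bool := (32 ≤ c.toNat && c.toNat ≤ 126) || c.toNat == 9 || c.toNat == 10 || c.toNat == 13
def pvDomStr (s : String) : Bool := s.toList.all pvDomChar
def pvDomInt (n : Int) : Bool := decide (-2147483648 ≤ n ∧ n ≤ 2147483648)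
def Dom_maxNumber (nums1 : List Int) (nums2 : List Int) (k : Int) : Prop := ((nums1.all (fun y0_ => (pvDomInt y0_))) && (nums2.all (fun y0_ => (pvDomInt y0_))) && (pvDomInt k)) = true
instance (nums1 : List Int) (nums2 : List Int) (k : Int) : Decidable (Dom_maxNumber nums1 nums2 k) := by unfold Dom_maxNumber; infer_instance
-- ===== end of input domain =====

-- B replaces A's monotonic-stack subsequence extraction by repeated windowed
-- leftmost-max scans and A's mutating merge by an index-based merge; objective:
-- alternative (same results, genuinely different traversal; no speed claim).

-- Python list comparison '<' on int lists (lexicographic, shorter prefix is smaller).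
def lexLt : List Int → List Int → Bool
  | [], [] => false
  | [], _ :: _ => true
  | _ :: _, [] => false
  | x :: xs, y :: ys => if x < y then true else if y < x then false else lexLt xs ys

-- Python max(a, b) on two lists: b if a < b else a.
def pyMax2 (a b : List Int) : List Int := if lexLt a b then b else a

-- ===== PORT A =====
-- The Python stack grows/pops at the right end; here it is kept TOP-FIRST
-- (head = Python stack[-1]), so append/pop become cons/tail; the returned
-- stack[:k] is taken on the reversed (bottom-first) list, exactly Python's view.
-- 'while stack and stack[-1] < v and giveup' (giveup truthy = nonzero), popping.
def popLoopA (stack : List Int) (v : Int) (g : Int) : List Int × Int :=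
  match stack with
  | [] => ([], g)
  | t :: s => if t < v ∧ g ≠ 0 then popLoopA s v (g - 1) else (t :: s, g)

-- one iteration of A's 'for i, v in enumerate(nums)' body (index i is unused)
def stepA (st : List Int × Int) (v : Int) : List Int × Int :=
  let p := popLoopA st.1 v st.2
  (v :: p.1, p.2)

def maxKSeqA (nums : List Int) (k : Int) : List Int :=
  let r := List.foldl stepA ([], (nums.length : Int) - k) nums
  PySem.List.slice r.1.reverse none (some k)   -- stack[:k]

-- A's merge loop: 'nums.append(max(nums1, nums2).pop(0))' until one side empties,
-- then 'nums + (nums1 or nums2)'; acc is the growing 'nums'.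
def mergeAGo (acc a b : List Int) : List Int :=
  match a, b with
  | [], ys => acc ++ ys
  | x :: xs, [] => acc ++ (x :: xs)
  | x :: xs, y :: ys =>
    if lexLt (x :: xs) (y :: ys) then mergeAGo (acc ++ [y]) (x :: xs) ys
    else mergeAGo (acc ++ [x]) xs (y :: ys)
termination_by a.length + b.length

def mergeA (a b : List Int) : List Int := mergeAGo [] a b

def maxNumber (nums1 : List Int) (nums2 : List Int) (k : Int) : List Int :=
  let l1 : Int := nums1.length
  let l2 : Int := nums2.length
  let ans := (PySem.List.pyRange 0 k 1).map (fun _ => (0 : Int))   -- [0 for _ in range(k)]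
  List.foldl
    (fun ans s => pyMax2 ans (mergeA (maxKSeqA nums1 s) (maxKSeqA nums2 (k - s))))
    ans (PySem.List.pyRange (max 0 (k - l2)) (min l1 k + 1) 1)

-- ===== PORT B =====
-- B's pick: recursion on k; Python's int k is always called with 0 ≤ k ≤ len(nums)
-- here, where recursion on k.toNat is exact.
def pickGo (nums : List Int) : Nat → List Int
  | 0 => []
  | kk + 1 =>
    let window := PySem.List.slice nums none (some ((nums.length : Int) - ((kk : Int) + 1) + 1))
    match PySem.List.max? window (fun x => x) with
    | none => []        -- Python max([]) raises; unreachable at B's call sites (k ≤ len)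
    | some m =>
      match PySem.List.index? window m with
      | none => []      -- unreachable: the max is a member of the window
      | some j => m :: pickGo (PySem.List.slice nums (some ((j : Int) + 1)) none) kk

def pickB (nums : List Int) (k : Int) : List Int := pickGo nums k.toNat

-- B's index-based merge; a[i]/b[j] are in range at their uses, where pyGetD is exact.
def mergeBGo (a b out : List Int) (i j : Nat) : List Int :=
  if i < a.length ∧ j < b.length then
    if lexLt (PySem.List.slice a (some (i : Int)) none) (PySem.List.slice b (some (j : Int)) none) = false then
      mergeBGo a b (out ++ [PySem.List.pyGetD a (i : Int) 0]) (i + 1) j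
    else
      mergeBGo a b (out ++ [PySem.List.pyGetD b (j : Int) 0]) i (j + 1)
  else out ++ PySem.List.slice a (some (i : Int)) none ++ PySem.List.slice b (some (j : Int)) none
termination_by (a.length - i) + (b.length - j)

def mergeB (a b : List Int) : List Int := mergeBGo a b [] 0 0

def maxNumber_alt (nums1 : List Int) (nums2 : List Int) (k : Int) : List Int :=
  let l1 : Int := nums1.length
  let l2 : Int := nums2.length
  let ans := (PySem.List.pyRange 0 k 1).map (fun _ => (0 : Int))
  List.foldl
    (fun ans s => pyMax2 ans (mergeB (pickB nums1 s) (pickB nums2 (k - s))))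
    ans (PySem.List.pyRange (max 0 (k - l2)) (min l1 k + 1) 1)

-- ===== PRECONDITION & SPEC =====
def Spec_maxNumber (nums1 : List Int) (nums2 : List Int) (k : Int) (out : List Int) : Prop := out = maxNumber_alt nums1 nums2 k
instance (nums1 : List Int) (nums2 : List Int) (k : Int) (out : List Int) : Decidable (Spec_maxNumber nums1 nums2 k out) := by unfold Spec_maxNumber; infer_instance

-- ===== CLAIM (what is proved, stated in full; the proofs are below) =====
def Claim_equal_maxNumber : Prop := ∀ (nums1 : List Int) (nums2 : List Int) (k : Int), Dom_maxNumber nums1 nums2 k → Spec_maxNumber nums1 nums2 k (maxNumber nums1 nums2 k)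

-- ===== LEMMAS AND PROOFS =====

-- merge equivalence
theorem mergeAGo_cons_cons (acc : List Int) (x y : Int) (xs ys : List Int) :
    mergeAGo acc (x :: xs) (y :: ys)
      = if lexLt (x :: xs) (y :: ys) then mergeAGo (acc ++ [y]) (x :: xs) ys
        else mergeAGo (acc ++ [x]) xs (y :: ys) := by
  rw [mergeAGo]

theorem mergeAGo_nil_left (acc ys : List Int) : mergeAGo acc [] ys = acc ++ ys := by
  rw [mergeAGo]

theorem mergeAGo_nil_right (acc : List Int) (x : Int) (xs : List Int) :
    mergeAGo acc (x :: xs) [] = acc ++ (x :: xs) := by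
  rw [mergeAGo]

theorem mergeBGo_eq (n : Nat) : ∀ (a b out : List Int) (i j : Nat),
    a.length - i + (b.length - j) ≤ n →
    mergeBGo a b out i j = mergeAGo out (a.drop i) (b.drop j) := by
  induction n with
  | zero =>
    intro a b out i j hn
    have hi : a.length ≤ i := by omega
    have hj : b.length ≤ j := by omega
    rw [mergeBGo, if_neg (by omega)]
    simp [PySem.List.slice_from_natCast, List.drop_eq_nil_of_le hi,
      List.drop_eq_nil_of_le hj, mergeAGo_nil_left]
  | succ n ih =>
    intro a b out i j hn
    rw [mergeBGo]
    simp only [PySem.List.slice_from_natCast]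
    by_cases h : i < a.length ∧ j < b.length
    · rw [if_pos h]
      have hda : a.drop i = a[i] :: a.drop (i + 1) := List.drop_eq_getElem_cons h.1
      have hdb : b.drop j = b[j] :: b.drop (j + 1) := List.drop_eq_getElem_cons h.2
      have hga : PySem.List.pyGetD a (i : Int) 0 = a[i] := by
        rw [PySem.List.pyGetD_natCast, List.getD_eq_getElem a 0 h.1]
      have hgb : PySem.List.pyGetD b (j : Int) 0 = b[j] := by
        rw [PySem.List.pyGetD_natCast, List.getD_eq_getElem b 0 h.2]
      by_cases hlex : lexLt (a.drop i) (b.drop j) = true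
      · rw [if_neg (by simp [hlex]), hgb,
          ih a b (out ++ [b[j]]) i (j + 1) (by omega)]
        rw [hda, hdb, mergeAGo_cons_cons, if_pos (by rw [← hda, ← hdb]; exact hlex)]
      · rw [if_pos (by simpa using hlex), hga,
          ih a b (out ++ [a[i]]) (i + 1) j (by omega)]
        rw [hda, hdb, mergeAGo_cons_cons,
          if_neg (by rw [← hda, ← hdb]; simpa using hlex)]
    · rw [if_neg h]
      rcases Nat.lt_or_ge i a.length with hi | hi
      · have hj : b.length ≤ j := by omega
        rw [List.drop_eq_nil_of_le hj, List.drop_eq_getElem_cons hi, mergeAGo_nil_right,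
          ← List.drop_eq_getElem_cons hi]
        simp
      · rw [List.drop_eq_nil_of_le hi, mergeAGo_nil_left]
        simp

theorem mergeB_eq_mergeA (a b : List Int) : mergeB a b = mergeA a b := by
  have := mergeBGo_eq (a.length + b.length) a b [] 0 0 (by omega)
  simpa [mergeB, mergeA] using this

-- popLoopA pops some top segment and decrements giveup by its size
theorem popLoop_drop (st : List Int) (v g : Int) :
    ∃ d ≤ st.length, popLoopA st v g = (st.drop d, g - d) := by
  induction st generalizing g with
  | nil => exact ⟨0, by simp, by simp [popLoopA]⟩
  | cons t s ih =>
    by_cases h : t < v ∧ g ≠ 0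
    · obtain ⟨d, hd, he⟩ := ih (g - 1)
      exact ⟨d + 1, by simpa using Nat.succ_le_succ hd,
        by simp [popLoopA, h, he]; ring⟩
    · exact ⟨0, by simp, by simp [popLoopA, h]⟩

theorem popLoop_nonneg (st : List Int) (v g : Int) (h : 0 ≤ g) :
    0 ≤ (popLoopA st v g).2 := by
  induction st generalizing g with
  | nil => simpa [popLoopA]
  | cons t s ih =>
    by_cases hc : t < v ∧ g ≠ 0
    · simp only [popLoopA, if_pos hc]
      exact ih (g - 1) (by omega)
    · simpa [popLoopA, hc]

theorem popLoop_all (st : List Int) (v g : Int)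
    (hlt : ∀ x ∈ st, x < v) (hg : (st.length : Int) ≤ g) :
    popLoopA st v g = ([], g - st.length) := by
  induction st generalizing g with
  | nil => simp [popLoopA]
  | cons t s ih =>
    have h1 : t < v := hlt t (by simp)
    have h2 : g ≠ 0 := by simp at hg; omega
    have := ih (g - 1) (fun x hx => hlt x (by simp [hx])) (by simp at hg ⊢; omega)
    simp [popLoopA, h1, h2, this]; ring

theorem popLoop_append_last (st : List Int) (v u g : Int) (hg : 0 ≤ g)
    (hb : v < u → g ≤ (st.length : Int)) :
    popLoopA (st ++ [v]) u g = ((popLoopA st u g).1 ++ [v], (popLoopA st u g).2) := by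
  induction st generalizing g with
  | nil =>
    have : ¬ (v < u ∧ g ≠ 0) := by
      rintro ⟨h1, h2⟩; have := hb h1; simp at this; omega
    simp [popLoopA, this]
  | cons t s ih =>
    by_cases hc : t < u ∧ g ≠ 0
    · simp only [List.cons_append, popLoopA, if_pos hc]
      exact ih (g - 1) (by omega) (fun h => by have := hb h; simp at this ⊢; omega)
    · simp [popLoopA, hc]

-- prefix phase: while all seen elements are < v, the stack holds only elements < v
-- and giveup minus stack size drops by one per element
theorem phaseP (p : List Int) : ∀ (st : List Int) (g v : Int),
    (∀ x ∈ p, x < v) → (∀ x ∈ st, x < v) →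
    (∀ x ∈ (List.foldl stepA (st, g) p).1, x < v) ∧
    (List.foldl stepA (st, g) p).2 - ((List.foldl stepA (st, g) p).1.length : Int)
      = g - st.length - p.length ∧
    (0 ≤ g → 0 ≤ (List.foldl stepA (st, g) p).2) := by
  induction p with
  | nil => intro st g v _ hst; exact ⟨hst, by simp, fun h => h⟩
  | cons u q ih =>
    intro st g v hp hst
    obtain ⟨d, hd, he⟩ := popLoop_drop st u g
    have hstep : stepA (st, g) u = (u :: st.drop d, g - d) := by
      simp [stepA, he]
    have hmem : ∀ x ∈ u :: st.drop d, x < v := by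
      intro x hx
      rcases List.mem_cons.mp hx with h | h
      · exact h ▸ hp u (by simp)
      · exact hst x (List.mem_of_mem_drop h)
    have hnn : 0 ≤ g → 0 ≤ g - d := by
      intro h
      have := popLoop_nonneg st u g h
      rw [he] at this; exact this
    have := ih (u :: st.drop d) (g - d) v (fun x hx => hp x (by simp [hx])) hmem
    simp only [List.foldl_cons, hstep]
    refine ⟨this.1, ?_, fun h => this.2.2 (hnn h)⟩
    rw [this.2.1]; simp; omega

theorem lockstep (rest : List Int) : ∀ (st : List Int) (g v : Int), 0 ≤ g →
    (∀ t (ht : t < rest.length), v < rest[t] → g ≤ (st.length : Int) + t) →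
    List.foldl stepA (st ++ [v], g) rest
      = ((List.foldl stepA (st, g) rest).1 ++ [v], (List.foldl stepA (st, g) rest).2) := by
  induction rest with
  | nil => intro st g v _ _; rfl
  | cons u q ih =>
    intro st g v hg hyp
    obtain ⟨d, hd, he⟩ := popLoop_drop st u g
    have hb : v < u → g ≤ (st.length : Int) := by
      intro h; simpa using hyp 0 (by simp) h
    have hap := popLoop_append_last st v u g hg hb
    have hstep1 : stepA (st ++ [v], g) u = ((u :: st.drop d) ++ [v], g - d) := by
      simp [stepA, hap, he]
    have hstep2 : stepA (st, g) u = (u :: st.drop d, g - d) := by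
      simp [stepA, he]
    have hnn : 0 ≤ g - d := by
      have := popLoop_nonneg st u g hg; rw [he] at this; exact this
    simp only [List.foldl_cons, hstep1, hstep2]
    refine ih (u :: st.drop d) (g - d) v hnn ?_
    intro t ht hv
    have := hyp (t + 1) (by simpa using Nat.succ_lt_succ ht) (by simpa using hv)
    simp at this ⊢; omega

-- the main extraction equivalence
theorem maxKSeq_eq_pick (kk : Nat) : ∀ (nums : List Int), kk ≤ nums.length →
    maxKSeqA nums (kk : Int) = pickGo nums kk := by
  induction kk with
  | zero =>
    intro nums _
    simp [maxKSeqA, pickGo, PySem.List.slice_to]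
  | succ kk ih =>
    intro nums hk
    have hcast : (nums.length : Int) - ((kk : Int) + 1) + 1 = ((nums.length - kk : Nat) : Int) := by
      push_cast [Nat.cast_sub (by omega : kk ≤ nums.length)]; ring
    have hwin : PySem.List.slice nums none (some ((nums.length : Int) - ((kk : Int) + 1) + 1))
        = nums.take (nums.length - kk) := by
      rw [hcast, PySem.List.slice_to_natCast]
    set w := nums.take (nums.length - kk) with hw
    have hwlen : w.length = nums.length - kk := by
      simp [hw]
    have hwne : w ≠ [] := by
      intro h; rw [h] at hwlen; simp at hwlen; omega
    rcases hmax : PySem.List.max? w (fun x => x) with _ | m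
    · exact absurd ((PySem.List.max?_eq_none_iff _ _).mp hmax) hwne
    have hmem : m ∈ w := PySem.List.max?_mem hmax
    have hle : ∀ y ∈ w, y ≤ m := PySem.List.max?_isMax hmax
    rcases hidx : PySem.List.index? w m with _ | j
    · exact absurd ((PySem.List.index?_eq_none_iff _ _).mp hidx) (by simp [hmem])
    obtain ⟨hjw, hjm, hjne⟩ := PySem.List.getElem_of_index?_eq_some hidx
    have hjlt : j < nums.length - kk := hwlen ▸ hjw
    have hjL : j < nums.length := by omega
    have hnj : nums[j] = m := by
      rw [← hjm]; simp [hw]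
    -- elements strictly before j are < m
    have hbefore : ∀ i (hi : i < j), nums[i]'(by omega) < m := by
      intro i hi
      have hiw : i < w.length := by omega
      have h1 : w[i] ≤ m := hle _ (List.getElem_mem hiw)
      have h2 : w[i] ≠ m := hjne i hi
      have h3 : w[i] = nums[i]'(by omega) := by simp [hw]
      rw [h3] at h1 h2
      omega
    -- split nums at position j
    have hsplit : nums = nums.take j ++ nums[j] :: nums.drop (j + 1) := by
      rw [← List.drop_eq_getElem_cons hjL, List.take_append_drop]
    set g : Int := (nums.length : Int) - ((kk : Int) + 1) with hg
    have hg0 : 0 ≤ g := by simp [hg]; omega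
    have hjg : (j : Int) ≤ g := by simp [hg]; omega
    -- prefix phase
    set P := List.foldl stepA ([], g) (nums.take j) with hP
    have htake_lt : ∀ x ∈ nums.take j, x < m := by
      intro x hx
      rw [List.mem_take_iff_getElem] at hx
      obtain ⟨i, hi, he⟩ := hx
      rw [← he]; exact hbefore i (by omega)
    obtain ⟨hP1, hP2, hP3⟩ := phaseP (nums.take j) [] g m htake_lt (by simp)
    rw [← hP] at hP1 hP2 hP3
    have hlentake : (nums.take j).length = j := by simp; omega
    rw [hlentake] at hP2
    simp only [List.length_nil, Nat.cast_zero, sub_zero] at hP2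
    have hstep : stepA P m = ([m], g - j) := by
      have hall : popLoopA P.1 m P.2 = ([], P.2 - P.1.length) :=
        popLoop_all P.1 m P.2 hP1 (by omega)
      simp [stepA, hall]
      omega
    -- rest phase
    set rest := nums.drop (j + 1) with hrest
    have hrlen : rest.length = nums.length - (j + 1) := by simp [hrest]
    have hkkr : kk ≤ rest.length := by omega
    set g0 : Int := g - j with hg00
    have hg0r : g0 = (rest.length : Int) - kk := by
      rw [hg00, hg, hrlen]; push_cast [Nat.cast_sub (by omega : j + 1 ≤ nums.length)]; ring
    have hlock : List.foldl stepA ([m], g0) rest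
        = ((List.foldl stepA ([], g0) rest).1 ++ [m], (List.foldl stepA ([], g0) rest).2) := by
      have := lockstep rest [] g0 m (by omega) ?_
      · simpa using this
      · intro t ht hv
        by_contra hcon
        have htg : (t : Int) < g0 := by simp at hcon; omega
        have hpos : j + 1 + t < nums.length - kk := by
          rw [hg0r] at htg; omega
        have hposL : j + 1 + t < nums.length := by omega
        have hrt : rest[t] = nums[j + 1 + t]'hposL := by
          simp [hrest]
        have hmemw : nums[j + 1 + t]'hposL ∈ w := by
          rw [hw]
          exact List.mem_take_iff_getElem.mpr ⟨j + 1 + t, by omega, by simp⟩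
        have := hle _ hmemw
        rw [hrt] at hv
        omega
    -- assemble the fold over all of nums
    have hfold : List.foldl stepA ([], g) nums
        = ((List.foldl stepA ([], g0) rest).1 ++ [m], (List.foldl stepA ([], g0) rest).2) := by
      conv_lhs => rw [hsplit]
      rw [List.foldl_append, List.foldl_cons, ← hP, hnj, hstep, hlock]
    -- finish
    have hLcast : (nums.length : Int) - ((kk : Nat) + 1 : Int) = g := by rw [hg]
    rw [maxKSeqA]
    simp only [Nat.cast_add, Nat.cast_one] at hLcast ⊢
    rw [hLcast, hfold]
    have hslice' : PySem.List.slice ((List.foldl stepA ([], g0) rest).1 ++ [m]).reverse none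
        (some ((kk : Int) + 1)) = (m :: (List.foldl stepA ([], g0) rest).1.reverse).take (kk + 1) := by
      have h1 : ((kk : Int) + 1) = (((kk + 1 : Nat)) : Int) := by push_cast; ring
      rw [h1, PySem.List.slice_to_natCast]
      simp
    rw [hslice']
    have hihs : maxKSeqA rest (kk : Int) = pickGo rest kk := ih rest hkkr
    rw [maxKSeqA] at hihs
    rw [← hg0r] at hihs
    have hsliceih : PySem.List.slice (List.foldl stepA ([], g0) rest).1.reverse none (some (kk : Int))
        = (List.foldl stepA ([], g0) rest).1.reverse.take kk := PySem.List.slice_to_natCast _ kk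
    rw [hsliceih] at hihs
    -- right-hand side: unfold pickGo
    rw [pickGo]
    rw [show (nums.length : Int) - ((kk : Int) + 1) + 1 = g + 1 by rw [hg], hwin]
    simp only [hmax, hidx]
    have hsfrom : PySem.List.slice nums (some ((j : Int) + 1)) none = rest := by
      have : ((j : Int) + 1) = (((j + 1 : Nat)) : Int) := by push_cast; ring
      rw [this, PySem.List.slice_from_natCast, hrest]
    rw [hsfrom]
    rw [List.take_succ_cons, hihs]

-- ===== VERDICT (by name: the statement is the Claim_ definition above) =====
theorem maxNumber_spec : Claim_equal_maxNumber := by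
  intro nums1 nums2 k _
  unfold Spec_maxNumber maxNumber maxNumber_alt
  apply PySem.List.foldl_congr_mem
  intro acc s hs
  rw [PySem.List.mem_pyRange_one] at hs
  have hs0 : (0 : Int) ≤ s := le_trans (le_max_left _ _) hs.1
  have hs1 : s ≤ (nums1.length : Int) := by
    have := hs.2
    have h2 : s ≤ min (nums1.length : Int) k := by omega
    exact le_trans h2 (min_le_left _ _)
  have hks0 : (0 : Int) ≤ k - s := by
    have h2 : s ≤ min (nums1.length : Int) k := by omega
    have := le_trans h2 (min_le_right _ _); omega
  have hks2 : k - s ≤ (nums2.length : Int) := by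
    have := le_trans (le_max_right (0 : Int) (k - (nums2.length : Int))) hs.1
    omega
  have e1 : maxKSeqA nums1 s = pickB nums1 s := by
    have h := maxKSeq_eq_pick s.toNat nums1 (by omega)
    rw [Int.toNat_of_nonneg hs0] at h
    rw [pickB, h]
  have e2 : maxKSeqA nums2 (k - s) = pickB nums2 (k - s) := by
    have h := maxKSeq_eq_pick (k - s).toNat nums2 (by omega)
    rw [Int.toNat_of_nonneg hks0] at h
    rw [pickB, h]
  rw [e1, e2, mergeB_eq_mergeA]
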